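-- pv_equiv track=rewrite | github.com/ShivamShrivastava18/globetrotter-group3 | backend/travel_generator.py | _parse_structured_activities
-- ===== SOURCE A (Python) =====
-- from typing import Dict, List, Any
--
-- def _parse_structured_activities(ai_output: str) -> List[Dict]:
--     """Parse structured activity format with clear labels"""
--     activities = []
--
--     # Look for structured format with labels
--     sections = ai_output.split('ACTIVITY NAME:')
--
--     for section in sections[1:]:  # Skip first empty section
--         activity = {
--             'name': '',
--             'description': '',
--             'price': '',
--             'hours': '',
--             'distance': '',
--             'transport': ''
--         }
--
--         lines = section.split('\n')
--         current_field = 'name'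
--
--         for line in lines:
--             line = line.strip()
--             if not line:
--                 continue
--
--             if line.startswith('DESCRIPTION:'):
--                 current_field = 'description'
--                 activity['description'] = line.replace('DESCRIPTION:', '').strip()
--             elif line.startswith('PRICE:'):
--                 current_field = 'price'
--                 activity['price'] = line.replace('PRICE:', '').strip()
--             elif line.startswith('HOURS:'):
--                 current_field = 'hours'
--                 activity['hours'] = line.replace('HOURS:', '').strip()
--             elif line.startswith('DISTANCE:'):
--                 current_field = 'distance'
--                 activity['distance'] = line.replace('DISTANCE:', '').strip()
--             elif line.startswith('TRANSPORT:'):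
--                 current_field = 'transport'
--                 activity['transport'] = line.replace('TRANSPORT:', '').strip()
--             elif current_field == 'name' and not activity['name']:
--                 activity['name'] = line
--             elif current_field == 'description' and not line.startswith(('PRICE:', 'HOURS:', 'DISTANCE:', 'TRANSPORT:')):
--                 activity['description'] += ' ' + line
--
--         # Clean up and add if valid
--         if activity['name']:
--             activity['description'] = activity['description'][:200] + "..." if len(activity['description']) > 200 else activity['description']
--             activities.append(activity)
--
--     return activities
-- ===== SOURCE B (Python) =====
-- # B: instead of a line-by-line state machine, group each section's stripped
-- # non-empty lines into a label-free prefix and labeled segments, then build the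
-- # fields from the segments (last segment per label wins); same return values.
--
-- _FIELD_OF = {'DESCRIPTION:': 'description', 'PRICE:': 'price', 'HOURS:': 'hours',
--              'DISTANCE:': 'distance', 'TRANSPORT:': 'transport'}
--
--
-- def _label_of(line):
--     for lab in _FIELD_OF:
--         if line.startswith(lab):
--             return lab
--     return None
--
--
-- def _segment_value(lab, head, tail):
--     val = head.replace(lab, '').strip()
--     if lab == 'DESCRIPTION:':
--         return ' '.join([val] + tail)
--     return val
--
--
-- def _parse_section(section):
--     lines = [ln for ln in (raw.strip() for raw in section.split('\n')) if ln]
--     prefix, segments, cur = [], [], None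
--     for ln in lines:
--         lab = _label_of(ln)
--         if lab is not None:
--             if cur is not None:
--                 segments.append(cur)
--             cur = (lab, ln, [])
--         elif cur is not None:
--             cur[2].append(ln)
--         else:
--             prefix.append(ln)
--     if cur is not None:
--         segments.append(cur)
--     fields = {'name': prefix[0] if prefix else '', 'description': '',
--               'price': '', 'hours': '', 'distance': '', 'transport': ''}
--     for lab, head, tail in segments:
--         fields[_FIELD_OF[lab]] = _segment_value(lab, head, tail)
--     if not fields['name']:
--         return None
--     d = fields['description']
--     if len(d) > 200:
--         fields['description'] = d[:200] + '...'
--     return fields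
--
--
-- def _parse_structured_activities(ai_output):
--     return [act for act in map(_parse_section, ai_output.split('ACTIVITY NAME:')[1:])
--             if act is not None]
-- ===== Notes on version B (the rewrite author's own statement) =====
-- stated objective: alternative
-- what changed: Replaces A's line-by-line current_field state machine (mutating the activity dict as it scans) by a two-phase decomposition: group each section's stripped non-empty lines into a label-free prefix plus labeled segments, then assemble the fields from the segments with last-label-wins and join the description segment's continuation lines.
import Mathlib
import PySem

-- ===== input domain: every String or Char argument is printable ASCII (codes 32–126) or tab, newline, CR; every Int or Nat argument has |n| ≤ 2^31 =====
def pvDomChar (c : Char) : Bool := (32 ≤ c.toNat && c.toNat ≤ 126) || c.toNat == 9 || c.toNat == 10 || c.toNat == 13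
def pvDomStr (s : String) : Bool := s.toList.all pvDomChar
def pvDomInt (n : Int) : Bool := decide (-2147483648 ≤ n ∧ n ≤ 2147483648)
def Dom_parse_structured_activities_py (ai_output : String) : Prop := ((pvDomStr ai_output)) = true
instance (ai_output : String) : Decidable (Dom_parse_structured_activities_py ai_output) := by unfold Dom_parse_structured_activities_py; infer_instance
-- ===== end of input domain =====

-- B replaces A's line-by-line state machine by grouping each section's stripped
-- non-empty lines into a label-free prefix and labeled segments and assembling the
-- fields from the segments (objective: alternative decomposition, same cost).

-- ===== PORT A =====
-- the initial activity dict {'name': '', 'description': '', ...}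
def pvActInit : PySem.Dict String String :=
  PySem.Dict.ofList [("name", ""), ("description", ""), ("price", ""),
                     ("hours", ""), ("distance", ""), ("transport", "")]

-- the body of A's inner `for line in lines:` loop; state = (activity, current_field)
def pvStepA (st : PySem.Dict String String × String) (raw : String) :
    PySem.Dict String String × String :=
  let activity := st.1
  let current_field := st.2
  let line := PySem.Str.strip raw
  if line = "" then st
  else if PySem.Str.startswith line "DESCRIPTION:" then
    (activity.insert "description" (PySem.Str.strip (PySem.Str.replace line "DESCRIPTION:" "")), "description")
  else if PySem.Str.startswith line "PRICE:" then
    (activity.insert "price" (PySem.Str.strip (PySem.Str.replace line "PRICE:" "")), "price")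
  else if PySem.Str.startswith line "HOURS:" then
    (activity.insert "hours" (PySem.Str.strip (PySem.Str.replace line "HOURS:" "")), "hours")
  else if PySem.Str.startswith line "DISTANCE:" then
    (activity.insert "distance" (PySem.Str.strip (PySem.Str.replace line "DISTANCE:" "")), "distance")
  else if PySem.Str.startswith line "TRANSPORT:" then
    (activity.insert "transport" (PySem.Str.strip (PySem.Str.replace line "TRANSPORT:" "")), "transport")
  else if current_field = "name" ∧ activity.getD "name" "" = "" then
    (activity.insert "name" line, current_field)
  else if current_field = "description" ∧
      ¬(PySem.Str.startswith line "PRICE:" || PySem.Str.startswith line "HOURS:" ||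
        PySem.Str.startswith line "DISTANCE:" || PySem.Str.startswith line "TRANSPORT:") = true then
    (activity.insert "description" (activity.getD "description" "" ++ " " ++ line), current_field)
  else st

-- the body of A's outer `for section in sections[1:]:` loop
def pvSectionA (acc : List (PySem.Dict String String)) (sec : String) :
    List (PySem.Dict String String) :=
  let lines := (PySem.Str.split? sec "\n").getD []        -- sep "\n" ≠ "", so split? is some
  let st := lines.foldl pvStepA (pvActInit, "name")
  let activity := st.1
  if activity.getD "name" "" ≠ "" then
    let d := activity.getD "description" ""
    let activity := activity.insert "description"
      (if PySem.Str.len d > 200 then PySem.Str.slice d none (some 200) ++ "..." else d)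
    acc ++ [activity]
  else acc

def parse_structured_activities_py (ai_output : String) : List (List (String × String)) :=
  -- sections = ai_output.split('ACTIVITY NAME:'); sep ≠ "" so split? is some
  (((((PySem.Str.split? ai_output "ACTIVITY NAME:").getD []).drop 1).foldl pvSectionA []).map
    PySem.Dict.items)

-- ===== PORT B =====
def pvLabels : List String := ["DESCRIPTION:", "PRICE:", "HOURS:", "DISTANCE:", "TRANSPORT:"]

def pvFieldOf (lab : String) : String :=
  if lab = "DESCRIPTION:" then "description"
  else if lab = "PRICE:" then "price"
  else if lab = "HOURS:" then "hours"
  else if lab = "DISTANCE:" then "distance"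
  else "transport"

def pvLabelOf (line : String) : Option String :=
  pvLabels.find? (fun lab => PySem.Str.startswith line lab)

def pvSegmentValue (lab head : String) (tail : List String) : String :=
  let val := PySem.Str.strip (PySem.Str.replace head lab "")
  if lab = "DESCRIPTION:" then PySem.Str.join " " ([val] ++ tail) else val

-- B's grouping loop; state = (prefix, segments, cur)
def pvGroupStep
    (st : List String × List (String × String × List String) × Option (String × String × List String))
    (ln : String) :
    List String × List (String × String × List String) × Option (String × String × List String) :=
  match pvLabelOf ln with
  | some lab => (st.1, st.2.1 ++ st.2.2.toList, some (lab, ln, []))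
  | none =>
    match st.2.2 with
    | some c => (st.1, st.2.1, some (c.1, c.2.1, c.2.2 ++ [ln]))
    | none => (st.1 ++ [ln], st.2.1, none)

def pvParseSection (sec : String) : Option (PySem.Dict String String) :=
  let lines := (((PySem.Str.split? sec "\n").getD []).map PySem.Str.strip).filter (· ≠ "")
  let g := lines.foldl pvGroupStep ([], [], none)
  let segments := g.2.1 ++ g.2.2.toList
  let fields := PySem.Dict.ofList [("name", g.1.headD ""), ("description", ""), ("price", ""),
                                   ("hours", ""), ("distance", ""), ("transport", "")]
  let fields := segments.foldl (fun d s => d.insert (pvFieldOf s.1) (pvSegmentValue s.1 s.2.1 s.2.2)) fields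
  if fields.getD "name" "" = "" then none
  else
    let d := fields.getD "description" ""
    some (if PySem.Str.len d > 200 then
            fields.insert "description" (PySem.Str.slice d none (some 200) ++ "...")
          else fields)

def parse_structured_activities_py_alt (ai_output : String) : List (List (String × String)) :=
  (((((PySem.Str.split? ai_output "ACTIVITY NAME:").getD []).drop 1).filterMap pvParseSection).map
    PySem.Dict.items)

-- ===== PRECONDITION & SPEC =====
def Spec_parse_structured_activities_py (ai_output : String) (out : List (List (String × String))) : Prop := out = parse_structured_activities_py_alt ai_output
instance (ai_output : String) (out : List (List (String × String))) : Decidable (Spec_parse_structured_activities_py ai_output out) := by unfold Spec_parse_structured_activities_py; infer_instance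

-- ===== CLAIM (what is proved, stated in full; the proofs are below) =====
def Claim_equal_parse_structured_activities_py : Prop := ∀ (ai_output : String), Dom_parse_structured_activities_py ai_output → Spec_parse_structured_activities_py ai_output (parse_structured_activities_py ai_output)

-- ===== LEMMAS AND PROOFS =====

-- A's inner step with the stripping factored out
def pvStepCore (st : PySem.Dict String String × String) (line : String) :
    PySem.Dict String String × String :=
  let activity := st.1
  let current_field := st.2
  if line = "" then st
  else if PySem.Str.startswith line "DESCRIPTION:" then
    (activity.insert "description" (PySem.Str.strip (PySem.Str.replace line "DESCRIPTION:" "")), "description")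
  else if PySem.Str.startswith line "PRICE:" then
    (activity.insert "price" (PySem.Str.strip (PySem.Str.replace line "PRICE:" "")), "price")
  else if PySem.Str.startswith line "HOURS:" then
    (activity.insert "hours" (PySem.Str.strip (PySem.Str.replace line "HOURS:" "")), "hours")
  else if PySem.Str.startswith line "DISTANCE:" then
    (activity.insert "distance" (PySem.Str.strip (PySem.Str.replace line "DISTANCE:" "")), "distance")
  else if PySem.Str.startswith line "TRANSPORT:" then
    (activity.insert "transport" (PySem.Str.strip (PySem.Str.replace line "TRANSPORT:" "")), "transport")
  else if current_field = "name" ∧ activity.getD "name" "" = "" then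
    (activity.insert "name" line, current_field)
  else if current_field = "description" ∧
      ¬(PySem.Str.startswith line "PRICE:" || PySem.Str.startswith line "HOURS:" ||
        PySem.Str.startswith line "DISTANCE:" || PySem.Str.startswith line "TRANSPORT:") = true then
    (activity.insert "description" (activity.getD "description" "" ++ " " ++ line), current_field)
  else st

theorem pvStepA_eq_core (st : PySem.Dict String String × String) (raw : String) :
    pvStepA st raw = pvStepCore st (PySem.Str.strip raw) := rfl

-- a six-field activity dict
def pvMk (n d p h di t : String) : PySem.Dict String String :=
  PySem.Dict.ofList [("name", n), ("description", d), ("price", p),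
                     ("hours", h), ("distance", di), ("transport", t)]

def pvInsertSeg (d : PySem.Dict String String) (s : String × String × List String) :
    PySem.Dict String String :=
  d.insert (pvFieldOf s.1) (pvSegmentValue s.1 s.2.1 s.2.2)

def pvBase (pfx : List String) : PySem.Dict String String := pvMk (pfx.headD "") "" "" "" "" ""

def pvAsm (pfx : List String) (segs : List (String × String × List String)) :
    PySem.Dict String String :=
  segs.foldl pvInsertSeg (pvBase pfx)

def pvFieldState (cur : Option (String × String × List String)) : String :=
  match cur with
  | none => "name"
  | some c => pvFieldOf c.1

def pvToA (s : List String × List (String × String × List String) × Option (String × String × List String)) :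
    PySem.Dict String String × String :=
  (pvAsm s.1 (s.2.1 ++ s.2.2.toList), pvFieldState s.2.2)

def pvInv (s : List String × List (String × String × List String) × Option (String × String × List String)) :
    Prop :=
  (s.2.2 = none → s.2.1 = []) ∧ (s.1 ≠ [] → s.1.headD "" ≠ "")

-- join over " " grows by " " ++ x on the right (nonempty list); proved on the Chars side
theorem pvJoinC_snoc (tl : List (List Char)) : ∀ (v x : List Char),
    PySem.Chars.join [' '] ((v :: tl) ++ [x]) =
      PySem.Chars.join [' '] (v :: tl) ++ [' '] ++ x := by
  induction tl with
  | nil =>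
    intro v x
    simp [PySem.Chars.join_cons_cons, PySem.Chars.join_singleton]
  | cons w tl ih =>
    intro v x
    simp only [List.cons_append, PySem.Chars.join_cons_cons]
    have h2 : w :: (tl ++ [x]) = (w :: tl) ++ [x] := rfl
    rw [h2, ih w x]
    simp [List.append_assoc]

theorem pvJoin_snoc (tl : List String) (v x : String) :
    PySem.Str.join " " ((v :: tl) ++ [x]) = PySem.Str.join " " (v :: tl) ++ " " ++ x := by
  rw [String.ext_iff]
  simp only [PySem.Str.toList_join, String.toList_append, List.map_append, List.map_cons,
    List.map_nil]
  simpa using pvJoinC_snoc (tl.map String.toList) v.toList x.toList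

theorem pvSegmentValue_nil (lab hd : String) :
    pvSegmentValue lab hd [] = PySem.Str.strip (PySem.Str.replace hd lab "") := by
  unfold pvSegmentValue
  split_ifs with h
  · rw [String.ext_iff]
    simp [PySem.Str.toList_join, PySem.Chars.join_singleton]
  · rfl

theorem pvSegmentValue_snoc_desc (hd x : String) (tl : List String) :
    pvSegmentValue "DESCRIPTION:" hd (tl ++ [x]) =
      pvSegmentValue "DESCRIPTION:" hd tl ++ " " ++ x := by
  unfold pvSegmentValue
  simp only [List.cons_append, ← List.append_assoc]
  exact pvJoin_snoc tl _ x

theorem pvSegmentValue_snoc_ndesc (lab hd x : String) (tl : List String) (h : lab ≠ "DESCRIPTION:") :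
    pvSegmentValue lab hd (tl ++ [x]) = pvSegmentValue lab hd tl := by
  unfold pvSegmentValue
  simp [h]

-- every assembled dict has the six-field shape
theorem pvAsm_shape (pfx : List String) (segs : List (String × String × List String)) :
    ∃ n d p h di t, pvAsm pfx segs = pvMk n d p h di t := by
  induction segs using List.reverseRecOn with
  | nil => exact ⟨pfx.headD "", "", "", "", "", "", rfl⟩
  | append_singleton segs s ih =>
    obtain ⟨n, d, p, h, di, t, hmk⟩ := ih
    unfold pvAsm at hmk ⊢
    rw [List.foldl_append, hmk]
    simp only [List.foldl_cons, List.foldl_nil]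
    unfold pvInsertSeg pvFieldOf
    split_ifs with h1 h2 h3 h4
    · exact ⟨n, _, p, h, di, t, rfl⟩
    · exact ⟨n, d, _, h, di, t, rfl⟩
    · exact ⟨n, d, p, _, di, t, rfl⟩
    · exact ⟨n, d, p, h, _, t, rfl⟩
    · exact ⟨n, d, p, h, di, _, rfl⟩

theorem pvMk_insert_desc_self (n d p h di t : String) :
    (pvMk n d p h di t).insert "description" ((pvMk n d p h di t).getD "description" "") =
      pvMk n d p h di t := rfl

theorem pvAsm_snoc (pfx : List String) (segs : List (String × String × List String))
    (sg : String × String × List String) :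
    pvAsm pfx (segs ++ [sg]) = pvInsertSeg (pvAsm pfx segs) sg := by
  unfold pvAsm
  rw [List.foldl_append]
  rfl

theorem pvFieldOf_ne_name (lab : String) : pvFieldOf lab ≠ "name" := by
  unfold pvFieldOf
  split_ifs <;> simp

theorem pvFieldOf_eq_desc_iff (lab : String) : pvFieldOf lab = "description" ↔ lab = "DESCRIPTION:" := by
  unfold pvFieldOf
  split_ifs with h1 h2 h3 h4 <;> simp_all

-- single-step agreement between A's machine and B's grouping
theorem pvStep_eq
    (s : List String × List (String × String × List String) × Option (String × String × List String))
    (l : String) (hl : l ≠ "") (hInv : pvInv s) :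
    pvStepCore (pvToA s) l = pvToA (pvGroupStep s l) ∧ pvInv (pvGroupStep s l) := by
  obtain ⟨pfx, segs, cur⟩ := s
  obtain ⟨hI1, hI2⟩ := hInv
  by_cases hD : PySem.Str.startswith l "DESCRIPTION:" = true
  ·
      have hlab : pvLabelOf l = some "DESCRIPTION:" := by
        unfold pvLabelOf pvLabels
        rw [List.find?_cons_of_pos hD]
      refine ⟨?_, ?_⟩
      · simp only [pvToA, pvGroupStep, hlab, pvFieldState, Option.toList_some]
        rw [pvAsm_snoc]
        simp only [pvInsertSeg, pvSegmentValue_nil]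
        have hf : pvFieldOf "DESCRIPTION:" = "description" := by simp [pvFieldOf]
        rw [hf]
        simp only [pvStepCore]
        rw [if_neg hl]
        rw [if_pos hD]
      · simp only [pvGroupStep, hlab, pvInv]
        exact ⟨by simp, hI2⟩
  ·
    by_cases hP : PySem.Str.startswith l "PRICE:" = true
    ·
        have hlab : pvLabelOf l = some "PRICE:" := by
          unfold pvLabelOf pvLabels
          rw [List.find?_cons_of_neg hD]
          rw [List.find?_cons_of_pos hP]
        refine ⟨?_, ?_⟩
        · simp only [pvToA, pvGroupStep, hlab, pvFieldState, Option.toList_some]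
          rw [pvAsm_snoc]
          simp only [pvInsertSeg, pvSegmentValue_nil]
          have hf : pvFieldOf "PRICE:" = "price" := by simp [pvFieldOf]
          rw [hf]
          simp only [pvStepCore]
          rw [if_neg hl]
          rw [if_neg hD]
          rw [if_pos hP]
        · simp only [pvGroupStep, hlab, pvInv]
          exact ⟨by simp, hI2⟩
    ·
      by_cases hH : PySem.Str.startswith l "HOURS:" = true
      ·
          have hlab : pvLabelOf l = some "HOURS:" := by
            unfold pvLabelOf pvLabels
            rw [List.find?_cons_of_neg hD]
            rw [List.find?_cons_of_neg hP]
            rw [List.find?_cons_of_pos hH]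
          refine ⟨?_, ?_⟩
          · simp only [pvToA, pvGroupStep, hlab, pvFieldState, Option.toList_some]
            rw [pvAsm_snoc]
            simp only [pvInsertSeg, pvSegmentValue_nil]
            have hf : pvFieldOf "HOURS:" = "hours" := by simp [pvFieldOf]
            rw [hf]
            simp only [pvStepCore]
            rw [if_neg hl]
            rw [if_neg hD]
            rw [if_neg hP]
            rw [if_pos hH]
          · simp only [pvGroupStep, hlab, pvInv]
            exact ⟨by simp, hI2⟩
      ·
        by_cases hDi : PySem.Str.startswith l "DISTANCE:" = true
        ·
            have hlab : pvLabelOf l = some "DISTANCE:" := by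
              unfold pvLabelOf pvLabels
              rw [List.find?_cons_of_neg hD]
              rw [List.find?_cons_of_neg hP]
              rw [List.find?_cons_of_neg hH]
              rw [List.find?_cons_of_pos hDi]
            refine ⟨?_, ?_⟩
            · simp only [pvToA, pvGroupStep, hlab, pvFieldState, Option.toList_some]
              rw [pvAsm_snoc]
              simp only [pvInsertSeg, pvSegmentValue_nil]
              have hf : pvFieldOf "DISTANCE:" = "distance" := by simp [pvFieldOf]
              rw [hf]
              simp only [pvStepCore]
              rw [if_neg hl]
              rw [if_neg hD]
              rw [if_neg hP]
              rw [if_neg hH]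
              rw [if_pos hDi]
            · simp only [pvGroupStep, hlab, pvInv]
              exact ⟨by simp, hI2⟩
        ·
          by_cases hT : PySem.Str.startswith l "TRANSPORT:" = true
          ·
              have hlab : pvLabelOf l = some "TRANSPORT:" := by
                unfold pvLabelOf pvLabels
                rw [List.find?_cons_of_neg hD]
                rw [List.find?_cons_of_neg hP]
                rw [List.find?_cons_of_neg hH]
                rw [List.find?_cons_of_neg hDi]
                rw [List.find?_cons_of_pos hT]
              refine ⟨?_, ?_⟩
              · simp only [pvToA, pvGroupStep, hlab, pvFieldState, Option.toList_some]
                rw [pvAsm_snoc]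
                simp only [pvInsertSeg, pvSegmentValue_nil]
                have hf : pvFieldOf "TRANSPORT:" = "transport" := by simp [pvFieldOf]
                rw [hf]
                simp only [pvStepCore]
                rw [if_neg hl]
                rw [if_neg hD]
                rw [if_neg hP]
                rw [if_neg hH]
                rw [if_neg hDi]
                rw [if_pos hT]
              · simp only [pvGroupStep, hlab, pvInv]
                exact ⟨by simp, hI2⟩
          ·
            have hlab : pvLabelOf l = none := by
              unfold pvLabelOf pvLabels
              rw [List.find?_cons_of_neg hD, List.find?_cons_of_neg hP, List.find?_cons_of_neg hH,
                List.find?_cons_of_neg hDi, List.find?_cons_of_neg hT, List.find?_nil]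
            match cur with
            | none =>
              have hsegs : segs = [] := hI1 rfl
              subst hsegs
              by_cases hpfx : pfx = []
              · subst hpfx
                refine ⟨?_, ?_⟩
                · simp only [pvToA, pvGroupStep, hlab, pvFieldState, Option.toList_none, List.append_nil]
                  simp only [pvStepCore]
                  rw [if_neg hl, if_neg hD, if_neg hP, if_neg hH, if_neg hDi, if_neg hT,
                    if_pos (by exact ⟨by simp, by rfl⟩)]
                  rfl
                · rw [show pvGroupStep ([], [], none) l = ([] ++ [l], [], none) from by
                    simp [pvGroupStep, hlab]]
                  exact ⟨fun _ => rfl, fun _ => by simpa using hl⟩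
              · have hhd : pfx.headD "" ≠ "" := hI2 hpfx
                refine ⟨?_, ?_⟩
                · simp only [pvToA, pvGroupStep, hlab, pvFieldState, Option.toList_none, List.append_nil]
                  have hbase : pvBase (pfx ++ [l]) = pvBase pfx := by
                    cases pfx with
                    | nil => exact absurd rfl hpfx
                    | cons a pfx => rfl
                  have hgetD : (pvAsm pfx []).getD "name" "" = pfx.headD "" := rfl
                  simp only [pvStepCore]
                  rw [if_neg hl, if_neg hD, if_neg hP, if_neg hH, if_neg hDi, if_neg hT]
                  rw [if_neg (by intro hc; exact hhd (hgetD ▸ hc.2)), if_neg (by intro hc; simp at hc)]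
                  show (pvAsm pfx [], "name") = (pvAsm (pfx ++ [l]) [], "name")
                  unfold pvAsm
                  rw [hbase]
                · rw [show pvGroupStep (pfx, [], none) l = (pfx ++ [l], [], none) from by
                    simp [pvGroupStep, hlab]]
                  refine ⟨fun _ => rfl, fun _ => ?_⟩
                  cases pfx with
                  | nil => exact absurd rfl hpfx
                  | cons a pfx => simpa using hhd
            | some c =>
              obtain ⟨lab, hd, tl⟩ := c
              by_cases hlabD : lab = "DESCRIPTION:"
              · subst hlabD
                refine ⟨?_, ?_⟩
                · simp only [pvToA, pvGroupStep, hlab, pvFieldState, Option.toList_some]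
                  rw [pvAsm_snoc, pvAsm_snoc]
                  simp only [pvInsertSeg]
                  have hfD : pvFieldOf "DESCRIPTION:" = "description" := by simp [pvFieldOf]
                  rw [hfD, pvSegmentValue_snoc_desc]
                  simp only [pvStepCore]
                  rw [if_neg hl, if_neg hD, if_neg hP, if_neg hH, if_neg hDi, if_neg hT]
                  rw [if_neg (by intro hc; simp at hc),
                    if_pos (by exact ⟨by simp, by simp at hP hH hDi hT; simp [hP, hH, hDi, hT]⟩)]
                  rw [PySem.Dict.getD_insert_self, PySem.Dict.insert_insert_self]
                · simp only [pvGroupStep, hlab, pvInv]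
                  exact ⟨by simp, hI2⟩
              · refine ⟨?_, ?_⟩
                · simp only [pvToA, pvGroupStep, hlab, pvFieldState, Option.toList_some]
                  rw [pvAsm_snoc, pvAsm_snoc]
                  simp only [pvInsertSeg]
                  rw [pvSegmentValue_snoc_ndesc _ _ _ _ hlabD]
                  simp only [pvStepCore]
                  rw [if_neg hl, if_neg hD, if_neg hP, if_neg hH, if_neg hDi, if_neg hT]
                  rw [if_neg (by intro hc; exact pvFieldOf_ne_name lab hc.1),
                    if_neg (by intro hc; exact hlabD ((pvFieldOf_eq_desc_iff lab).mp hc.1))]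
                · simp only [pvGroupStep, hlab, pvInv]
                  exact ⟨by simp, hI2⟩

theorem pvRun_eq (L : List String) :
    ∀ s, (∀ l ∈ L, l ≠ "") → pvInv s →
      L.foldl pvStepCore (pvToA s) = pvToA (L.foldl pvGroupStep s) := by
  induction L with
  | nil => intro s _ _; rfl
  | cons l L ih =>
    intro s hne hInv
    obtain ⟨h1, h2⟩ := pvStep_eq s l (hne l (by simp)) hInv
    simpa [List.foldl_cons, h1] using ih (pvGroupStep s l) (fun x hx => hne x (by simp [hx])) h2

-- per-section agreement
theorem pvSection_eq (acc : List (PySem.Dict String String)) (sec : String) :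
    pvSectionA acc sec = acc ++ (pvParseSection sec).toList := by
  simp only [pvSectionA, pvParseSection]
  set lines := (PySem.Str.split? sec "\n").getD [] with hlines
  have hfold : lines.foldl pvStepA (pvActInit, "name")
      = ((lines.map PySem.Str.strip).filter (fun x => x ≠ "")).foldl pvStepCore (pvActInit, "name") := by
    rw [List.foldl_filter, List.foldl_map]
    refine List.foldl_ext _ _ _ (fun a b _ => ?_)
    rw [pvStepA_eq_core]
    by_cases hb : PySem.Str.strip b = ""
    · simp [hb, pvStepCore]
    · simp [hb]
  have hrun := pvRun_eq ((lines.map PySem.Str.strip).filter (fun x => x ≠ "")) ([], [], none)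
    (fun l hm => by simpa using (List.mem_filter.mp hm).2)
    ⟨fun _ => rfl, fun h => absurd rfl h⟩
  have hinit : pvToA ([], [], none) = (pvActInit, "name") := rfl
  rw [hinit] at hrun
  rw [hfold, hrun]
  set g := ((lines.map PySem.Str.strip).filter (fun x => x ≠ "")).foldl pvGroupStep ([], [], none)
    with hg
  have hfields : (g.2.1 ++ g.2.2.toList).foldl
      (fun d s => d.insert (pvFieldOf s.1) (pvSegmentValue s.1 s.2.1 s.2.2))
      (PySem.Dict.ofList [("name", g.1.headD ""), ("description", ""), ("price", ""),
        ("hours", ""), ("distance", ""), ("transport", "")]) = (pvToA g).1 := rfl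
  rw [hfields]
  by_cases hname : (pvToA g).1.getD "name" "" = ""
  · rw [if_neg (not_not_intro hname), if_pos hname]
    simp
  · rw [if_pos hname, if_neg hname]
    by_cases hlen : PySem.Str.len ((pvToA g).1.getD "description" "") > 200
    · rw [if_pos hlen, if_pos hlen]
      simp
    · rw [if_neg hlen, if_neg hlen]
      have hX : (pvToA g).1 = pvAsm g.1 (g.2.1 ++ g.2.2.toList) := rfl
      rw [hX]
      obtain ⟨n, d, p, h, di, t, hmk⟩ := pvAsm_shape g.1 (g.2.1 ++ g.2.2.toList)
      rw [hmk, pvMk_insert_desc_self]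
      simp

theorem pvFold_sections (secs : List String) :
    ∀ acc, secs.foldl pvSectionA acc = acc ++ secs.filterMap pvParseSection := by
  induction secs with
  | nil => intro acc; simp
  | cons s secs ih =>
    intro acc
    rw [List.foldl_cons, ih, pvSection_eq, List.filterMap_cons]
    cases pvParseSection s <;> simp

-- ===== VERDICT (by name: the statement is the Claim_ definition above) =====
theorem parse_structured_activities_py_spec : Claim_equal_parse_structured_activities_py := by
  intro ai_output _
  unfold Spec_parse_structured_activities_py parse_structured_activities_py
    parse_structured_activities_py_alt
  rw [pvFold_sections]
  simp
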